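-- pv_equiv track=rewrite | github.com/christianebacani/Roadmap | Coding Challenges using Python and SQL/Code Wars Python Solved Problems/7 Kyu/sum_of_numbers_from_0_to_n.py | show_sequence
-- ===== SOURCE A (Python) =====
-- def show_sequence(n: int) -> str:
--     if n == 0:
--         return '0=0'
--
--     elif n < 0:
--         return f'{n}<0'
--
--     else:
--         result = []
--
--         for number in range(n + 1):
--             result.append(str(number))
--
--         total = 0
--
--         for i in range(len(result)):
--             total += int(result[i])
--
--         result = '+'.join(result)
--         result = result + ' = ' + str(total)
--
--         return result
-- ===== SOURCE B (Python) =====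
-- def show_sequence(n: int) -> str:
--     if n == 0:
--         return '0=0'
--
--     if n < 0:
--         return f'{n}<0'
--
--     total = n * (n + 1) // 2
--     return '+'.join(map(str, range(n + 1))) + f' = {total}'
-- ===== Notes on version B (the rewrite author's own statement) =====
-- stated objective: faster
-- what changed: B drops A's second loop that re-parses every decimal string with int() and sums, computing the total in closed form (n*(n+1)//2) instead, and builds the sequence with a single join over map(str, range(n+1)) instead of an explicit append loop.
import Mathlib
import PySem

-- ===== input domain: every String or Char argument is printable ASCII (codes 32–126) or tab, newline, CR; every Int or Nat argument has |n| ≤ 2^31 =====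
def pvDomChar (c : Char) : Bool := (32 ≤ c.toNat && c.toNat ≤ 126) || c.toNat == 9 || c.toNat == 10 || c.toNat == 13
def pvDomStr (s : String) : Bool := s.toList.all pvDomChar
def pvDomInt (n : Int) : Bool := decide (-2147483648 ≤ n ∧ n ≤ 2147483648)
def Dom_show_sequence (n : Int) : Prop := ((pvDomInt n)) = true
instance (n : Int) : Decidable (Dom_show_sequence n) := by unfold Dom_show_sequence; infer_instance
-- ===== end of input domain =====

-- B computes the total in closed form and joins the mapped range directly, removing A's
-- string-re-parsing summation pass (measurably faster by a constant factor).
-- ===== PORT A =====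
-- Port of A: builds the list of decimal strings with an append loop, re-parses each
-- string back to an int to sum (int(result[i]) always succeeds here, so the parse
-- Option is read with getD 0; result[i] is always in range, so pyGetD's default is never used).
def show_sequence (n : Int) : String :=
  if n = 0 then "0=0"
  else if n < 0 then PySem.Int.toStr n ++ "<0"
  else
    let result : List String :=
      (PySem.List.pyRange 0 (n + 1) 1).foldl (fun acc number => acc ++ [PySem.Int.toStr number]) []
    let total : Int :=
      (PySem.List.pyRange 0 (PySem.List.len result) 1).foldl
        (fun t i => t + (PySem.Int.ofStr? (PySem.List.pyGetD result i "")).getD 0) 0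
    let r := PySem.Str.join "+" result
    r ++ " = " ++ PySem.Int.toStr total

-- ===== PORT B =====
-- Port of B: closed-form total n*(n+1)//2 and a single join over the mapped range.
def show_sequence_alt (n : Int) : String :=
  if n = 0 then "0=0"
  else if n < 0 then PySem.Int.toStr n ++ "<0"
  else
    let total : Int := PySem.Int.floordiv (n * (n + 1)) 2
    PySem.Str.join "+" ((PySem.List.pyRange 0 (n + 1) 1).map PySem.Int.toStr) ++ " = " ++ PySem.Int.toStr total

-- ===== PRECONDITION & SPEC =====
def Spec_show_sequence (n : Int) (out : String) : Prop := out = show_sequence_alt n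
instance (n : Int) (out : String) : Decidable (Spec_show_sequence n out) := by unfold Spec_show_sequence; infer_instance

-- ===== CLAIM (what is proved, stated in full; the proofs are below) =====
def Claim_equal_show_sequence : Prop := ∀ (n : Int), Dom_show_sequence n → Spec_show_sequence n (show_sequence n)

-- ===== LEMMAS AND PROOFS =====
-- A private recursive helper inside PySem.Int.ofChars? is re-stated here (myGo/myDigitsVal?/myOfChars?)
-- and proved pointwise equal to PySem.Int.ofChars? (lemma oc), so that int(str(k)) = k can be proved.
def myGo : List Char → Bool → Nat → Option Nat
  | [], afterDigit, acc => if afterDigit = true then some acc else none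
  | c :: rest, afterDigit, acc =>
    if c.isDigit = true then myGo rest true (acc * 10 + (c.toNat - '0'.toNat))
    else
      if c = '_' ∧ afterDigit = true then
        match rest with
        | d :: _tail => if d.isDigit = true then myGo rest false acc else none
        | [] => none
      else none

def myDigitsVal? : List Char → Option Nat
  | [] => none
  | cs => myGo cs false 0

def myOfChars? (s : List Char) : Option Int :=
  have cs := (List.dropWhile PySem.Int.isIntSpace (List.dropWhile PySem.Int.isIntSpace s).reverse).reverse
  match cs with
  | [] => Option.map (fun (n : Int) => n) (do let a ← myDigitsVal? ([] : List Char); pure ((a : Int)))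
  | c :: ds =>
    if c = '-' then Option.map (fun (n : Int) => -n) (do let a ← myDigitsVal? ds; pure ((a : Int)))
    else if c = '+' then Option.map (fun (n : Int) => n) (do let a ← myDigitsVal? ds; pure ((a : Int)))
    else Option.map (fun (n : Int) => n) (do let a ← myDigitsVal? (c :: ds); pure ((a : Int)))

lemma myGo_cons_digit (c : Char) (t : List Char) (flag : Bool) (a : Nat) (hc : c.isDigit = true) :
    myGo (c :: t) flag a = myGo t true (a * 10 + (c.toNat - '0'.toNat)) := by
  simp only [myGo, hc, if_pos]

lemma oc (s : List Char) : PySem.Int.ofChars? s = myOfChars? s := by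
  unfold PySem.Int.ofChars? myOfChars?
  generalize (List.dropWhile PySem.Int.isIntSpace (List.dropWhile PySem.Int.isIntSpace s).reverse).reverse = cs
  dsimp only
  split
  · rename_i ds
    conv_rhs => whnf
    congr 2
    cases ds with
    | nil => with_unfolding_all rfl
    | cons d t =>
      rcases hd : d.isDigit with _ | _
      · conv_lhs => whnf
        rw [hd]
        conv_lhs => whnf
        rw [Subsingleton.elim (@instDecidableAnd (d = '_') (false = true) (instDecidableEqChar d '_') (instDecidableEqBool false true)) (isFalse (by simp))]
        conv_lhs => whnf
        simp [myDigitsVal?, myGo, hd]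
      · conv_lhs => whnf
        rw [hd]
        conv_lhs => whnf
        rw [show myDigitsVal? (d :: t) = myGo t true (0 * 10 + (d.toNat - '0'.toNat)) from by
          simp only [myDigitsVal?]; exact myGo_cons_digit d t false 0 hd]
        generalize (0 * 10 + (d.toNat - '0'.toNat) : Nat) = a
        generalize (true : Bool) = flag
        obtain ⟨n, hn⟩ : ∃ n, t.length ≤ n := ⟨t.length, le_rfl⟩
        induction n generalizing t flag a with
        | zero =>
          rw [List.eq_nil_of_length_eq_zero (Nat.le_zero.mp hn)]
          with_unfolding_all rfl
        | succ n IH =>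
          cases t with
          | nil => with_unfolding_all rfl
          | cons c t' =>
            have hn' : t'.length ≤ n := by simp at hn; omega
            rcases hc : c.isDigit with _ | _
            · conv_lhs => whnf
              rw [hc]
              conv_lhs => whnf
              by_cases hu : c = '_' ∧ flag = true
              · rw [Subsingleton.elim (@instDecidableAnd (c = '_') (flag = true) (instDecidableEqChar c '_') (instDecidableEqBool flag true)) (isTrue hu)]
                conv_lhs => whnf
                cases t' with
                | nil => simp [myGo, hu]
                | cons e u =>
                  have hu' : u.length ≤ n := by simp at hn'; omega
                  rcases he : e.isDigit with _ | _
                  · conv_lhs => whnf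
                    rw [he]
                    conv_lhs => whnf
                    simp [myGo, hu, he]
                  · conv_lhs => whnf
                    rw [he]
                    conv_lhs => whnf
                    rw [he]
                    conv_lhs => whnf
                    rw [IH u (a * 10 + (e.toNat - '0'.toNat)) true hu']
                    simp [myGo, hu, he]
              · rw [Subsingleton.elim (@instDecidableAnd (c = '_') (flag = true) (instDecidableEqChar c '_') (instDecidableEqBool flag true)) (isFalse hu)]
                conv_lhs => whnf
                simp [myGo, hc, hu]
            · conv_lhs => whnf
              rw [hc]
              conv_lhs => whnf
              rw [myGo_cons_digit c t' flag a hc]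
              exact IH t' (a * 10 + (c.toNat - '0'.toNat)) true hn'

  · rename_i ds
    conv_rhs => whnf
    congr 2
    cases ds with
    | nil => with_unfolding_all rfl
    | cons d t =>
      rcases hd : d.isDigit with _ | _
      · conv_lhs => whnf
        rw [hd]
        conv_lhs => whnf
        rw [Subsingleton.elim (@instDecidableAnd (d = '_') (false = true) (instDecidableEqChar d '_') (instDecidableEqBool false true)) (isFalse (by simp))]
        conv_lhs => whnf
        simp [myDigitsVal?, myGo, hd]
      · conv_lhs => whnf
        rw [hd]
        conv_lhs => whnf
        rw [show myDigitsVal? (d :: t) = myGo t true (0 * 10 + (d.toNat - '0'.toNat)) from by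
          simp only [myDigitsVal?]; exact myGo_cons_digit d t false 0 hd]
        generalize (0 * 10 + (d.toNat - '0'.toNat) : Nat) = a
        generalize (true : Bool) = flag
        obtain ⟨n, hn⟩ : ∃ n, t.length ≤ n := ⟨t.length, le_rfl⟩
        induction n generalizing t flag a with
        | zero =>
          rw [List.eq_nil_of_length_eq_zero (Nat.le_zero.mp hn)]
          with_unfolding_all rfl
        | succ n IH =>
          cases t with
          | nil => with_unfolding_all rfl
          | cons c t' =>
            have hn' : t'.length ≤ n := by simp at hn; omega
            rcases hc : c.isDigit with _ | _
            · conv_lhs => whnf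
              rw [hc]
              conv_lhs => whnf
              by_cases hu : c = '_' ∧ flag = true
              · rw [Subsingleton.elim (@instDecidableAnd (c = '_') (flag = true) (instDecidableEqChar c '_') (instDecidableEqBool flag true)) (isTrue hu)]
                conv_lhs => whnf
                cases t' with
                | nil => simp [myGo, hu]
                | cons e u =>
                  have hu' : u.length ≤ n := by simp at hn'; omega
                  rcases he : e.isDigit with _ | _
                  · conv_lhs => whnf
                    rw [he]
                    conv_lhs => whnf
                    simp [myGo, hu, he]
                  · conv_lhs => whnf
                    rw [he]
                    conv_lhs => whnf
                    rw [he]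
                    conv_lhs => whnf
                    rw [IH u (a * 10 + (e.toNat - '0'.toNat)) true hu']
                    simp [myGo, hu, he]
              · rw [Subsingleton.elim (@instDecidableAnd (c = '_') (flag = true) (instDecidableEqChar c '_') (instDecidableEqBool flag true)) (isFalse hu)]
                conv_lhs => whnf
                simp [myGo, hc, hu]
            · conv_lhs => whnf
              rw [hc]
              conv_lhs => whnf
              rw [myGo_cons_digit c t' flag a hc]
              exact IH t' (a * 10 + (c.toNat - '0'.toNat)) true hn'

  · rename_i h1 h2
    cases cs with
    | nil => with_unfolding_all rfl
    | cons c t =>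
      have hc1 : ¬ (c = '-') := fun h => h1 t (by rw [h])
      have hc2 : ¬ (c = '+') := fun h => h2 t (by rw [h])
      conv_rhs => whnf
      rw [Subsingleton.elim (instDecidableEqChar c '-') (isFalse hc1)]
      conv_rhs => whnf
      rw [Subsingleton.elim (instDecidableEqChar c '+') (isFalse hc2)]
      conv_rhs => whnf
      congr 2
      clear h1 h2 hc1 hc2
      generalize (c :: t : List Char) = ds
      cases ds with
      | nil => with_unfolding_all rfl
      | cons d t =>
        rcases hd : d.isDigit with _ | _
        · conv_lhs => whnf
          rw [hd]
          conv_lhs => whnf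
          rw [Subsingleton.elim (@instDecidableAnd (d = '_') (false = true) (instDecidableEqChar d '_') (instDecidableEqBool false true)) (isFalse (by simp))]
          conv_lhs => whnf
          simp [myDigitsVal?, myGo, hd]
        · conv_lhs => whnf
          rw [hd]
          conv_lhs => whnf
          rw [show myDigitsVal? (d :: t) = myGo t true (0 * 10 + (d.toNat - '0'.toNat)) from by
            simp only [myDigitsVal?]; exact myGo_cons_digit d t false 0 hd]
          generalize (0 * 10 + (d.toNat - '0'.toNat) : Nat) = a
          generalize (true : Bool) = flag
          obtain ⟨n, hn⟩ : ∃ n, t.length ≤ n := ⟨t.length, le_rfl⟩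
          induction n generalizing t flag a with
          | zero =>
            rw [List.eq_nil_of_length_eq_zero (Nat.le_zero.mp hn)]
            with_unfolding_all rfl
          | succ n IH =>
            cases t with
            | nil => with_unfolding_all rfl
            | cons c t' =>
              have hn' : t'.length ≤ n := by simp at hn; omega
              rcases hc : c.isDigit with _ | _
              · conv_lhs => whnf
                rw [hc]
                conv_lhs => whnf
                by_cases hu : c = '_' ∧ flag = true
                · rw [Subsingleton.elim (@instDecidableAnd (c = '_') (flag = true) (instDecidableEqChar c '_') (instDecidableEqBool flag true)) (isTrue hu)]
                  conv_lhs => whnf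
                  cases t' with
                  | nil => simp [myGo, hu]
                  | cons e u =>
                    have hu' : u.length ≤ n := by simp at hn'; omega
                    rcases he : e.isDigit with _ | _
                    · conv_lhs => whnf
                      rw [he]
                      conv_lhs => whnf
                      simp [myGo, hu, he]
                    · conv_lhs => whnf
                      rw [he]
                      conv_lhs => whnf
                      rw [he]
                      conv_lhs => whnf
                      rw [IH u (a * 10 + (e.toNat - '0'.toNat)) true hu']
                      simp [myGo, hu, he]
                · rw [Subsingleton.elim (@instDecidableAnd (c = '_') (flag = true) (instDecidableEqChar c '_') (instDecidableEqBool flag true)) (isFalse hu)]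
                  conv_lhs => whnf
                  simp [myGo, hc, hu]
              · conv_lhs => whnf
                rw [hc]
                conv_lhs => whnf
                rw [myGo_cons_digit c t' flag a hc]
                exact IH t' (a * 10 + (c.toNat - '0'.toNat)) true hn'


-- decimal digit list of a natural number (same shape Nat.toDigits produces)
def digs (n : Nat) : List Char :=
  if _h : n < 10 then [Nat.digitChar n]
  else digs (n / 10) ++ [Nat.digitChar (n % 10)]
decreasing_by exact Nat.div_lt_self (by omega) (by omega)

lemma toDigitsCore_eq_digs (fuel : Nat) : ∀ (n : Nat) (l : List Char), n < fuel →
    Nat.toDigitsCore 10 fuel n l = digs n ++ l := by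
  induction fuel with
  | zero => omega
  | succ fuel ih =>
    intro n l h
    rw [Nat.toDigitsCore]
    by_cases h10 : n / 10 = 0
    · have hn : n < 10 := by omega
      rw [if_pos h10, digs, dif_pos hn, Nat.mod_eq_of_lt hn]
      simp
    · have hn : ¬ n < 10 := by omega
      rw [if_neg h10, ih (n / 10) _ (by omega)]
      conv_rhs => rw [digs, dif_neg hn]
      simp

lemma toDigits_eq_digs (n : Nat) : Nat.toDigits 10 n = digs n := by
  rw [Nat.toDigits, toDigitsCore_eq_digs (n + 1) n [] (by omega)]
  simp

lemma digitChar_isDigit (k : Nat) (h : k < 10) : (Nat.digitChar k).isDigit = true := by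
  interval_cases k <;> decide

lemma digitChar_val (k : Nat) (h : k < 10) : (Nat.digitChar k).toNat - '0'.toNat = k := by
  interval_cases k <;> decide

lemma digs_all_digit (n : Nat) : ∀ c ∈ digs n, c.isDigit = true := by
  induction n using Nat.strong_induction_on with
  | _ n ih =>
    rw [digs]
    split
    · simpa using digitChar_isDigit n (by omega)
    · intro c hc
      rcases List.mem_append.mp hc with h | h
      · exact ih (n / 10) (Nat.div_lt_self (by omega) (by omega)) c h
      · simpa using (List.mem_singleton.mp h) ▸ digitChar_isDigit (n % 10) (Nat.mod_lt _ (by omega))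

lemma digs_ne_nil (n : Nat) : digs n ≠ [] := by
  rw [digs]; split <;> simp

lemma myGo_all_digit (l : List Char) : ∀ (a : Nat), (∀ c ∈ l, c.isDigit = true) →
    myGo l true a = some (l.foldl (fun v c => v * 10 + (c.toNat - '0'.toNat)) a) := by
  induction l with
  | nil => intro a _; simp [myGo]
  | cons c t ih =>
    intro a h
    rw [myGo_cons_digit c t true a (h c (by simp))]
    rw [ih _ (fun d hd => h d (by simp [hd]))]
    simp

lemma foldl_digs (n : Nat) : ∀ a : Nat,
    (digs n).foldl (fun v c => v * 10 + (c.toNat - '0'.toNat)) a = a * 10 ^ (digs n).length + n := by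
  induction n using Nat.strong_induction_on with
  | _ n ih =>
    intro a
    rw [digs]
    split
    · rename_i h10
      have hv := digitChar_val n (by omega)
      simp only [List.foldl_cons, List.foldl_nil, List.length_singleton, pow_one]
      rw [hv]
    · rename_i h10
      rw [List.foldl_append]
      rw [ih (n / 10) (Nat.div_lt_self (by omega) (by omega)) a]
      simp only [List.foldl_cons, List.foldl_nil, List.length_append, List.length_singleton]
      rw [digitChar_val (n % 10) (Nat.mod_lt _ (by omega))]
      have : n % 10 + 10 * (n / 10) = n := Nat.mod_add_div n 10
      ring_nf
      omega

lemma isIntSpace_of_digit (c : Char) (h : c.isDigit = true) : PySem.Int.isIntSpace c = false := by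
  simp only [Char.isDigit, decide_eq_true_eq, Bool.and_eq_true] at h
  simp only [PySem.Int.isIntSpace, Bool.or_eq_false_iff, decide_eq_false_iff_not]
  have h1 : 48 ≤ c.toNat := h.1
  have h2 : c.toNat ≤ 57 := h.2
  refine ⟨⟨⟨⟨⟨?_, ?_⟩, ?_⟩, ?_⟩, ?_⟩, ?_⟩ <;> (intro he; subst he; simp at h1 h2)

lemma dropWhile_digits (l : List Char) (h : ∀ c ∈ l, c.isDigit = true) :
    List.dropWhile PySem.Int.isIntSpace l = l := by
  cases l with
  | nil => rfl
  | cons c t => simp [List.dropWhile, isIntSpace_of_digit c (h c (by simp))]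

lemma myDigitsVal?_digs (n : Nat) : myDigitsVal? (digs n) = some n := by
  obtain ⟨c, t, hct⟩ : ∃ c t, digs n = c :: t := by
    cases hd : digs n with
    | nil => exact absurd hd (digs_ne_nil n)
    | cons c t => exact ⟨c, t, rfl⟩
  have hall := digs_all_digit n
  rw [hct] at hall ⊢
  have hstep : myDigitsVal? (c :: t) = myGo (c :: t) false 0 := by
    simp [myDigitsVal?]
  rw [hstep, myGo_cons_digit c t false 0 (hall c (by simp))]
  rw [myGo_all_digit t _ (fun d hd => hall d (by simp [hd]))]
  have : (c :: t).foldl (fun v d => v * 10 + (d.toNat - '0'.toNat)) 0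
      = t.foldl (fun v d => v * 10 + (d.toNat - '0'.toNat)) (0 * 10 + (c.toNat - '0'.toNat)) := by
    simp
  rw [← this, ← hct, foldl_digs n 0]
  simp

lemma myOfChars?_digs (n : Nat) : myOfChars? (digs n) = some (n : Int) := by
  have hall := digs_all_digit n
  have hrev : ∀ c ∈ (digs n).reverse, c.isDigit = true := fun c hc => hall c (List.mem_reverse.mp hc)
  unfold myOfChars?
  rw [dropWhile_digits _ hall, dropWhile_digits _ hrev, List.reverse_reverse]
  obtain ⟨c, t, hct⟩ : ∃ c t, digs n = c :: t := by
    cases hd : digs n with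
    | nil => exact absurd hd (digs_ne_nil n)
    | cons c t => exact ⟨c, t, rfl⟩
  rw [hct]
  have hcdig : c.isDigit = true := by rw [hct] at hall; exact hall c (by simp)
  have hc1 : ¬ (c = '-') := by intro h; rw [h] at hcdig; simp at hcdig
  have hc2 : ¬ (c = '+') := by intro h; rw [h] at hcdig; simp at hcdig
  simp only [if_neg hc1, if_neg hc2]
  rw [← hct, myDigitsVal?_digs n]
  rfl

lemma roundtrip (k : Int) (h : 0 ≤ k) : PySem.Int.ofStr? (PySem.Int.toStr k) = some k := by
  rw [PySem.Int.toStr.eq_1, PySem.Int.ofStr?_ofList, oc]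
  unfold PySem.Int.toChars
  rw [if_neg (by omega), toDigits_eq_digs, myOfChars?_digs]
  congr 1
  omega

lemma foldl_append_map (l : List Int) (f : Int → String) :
    ∀ init : List String, l.foldl (fun acc x => acc ++ [f x]) init = init ++ l.map f := by
  induction l with
  | nil => intro init; simp
  | cons x xs ih => intro init; simp [List.foldl_cons, ih]

lemma sum_pyRange (m : Nat) :
    2 * ((PySem.List.pyRange 0 (m : Int) 1).foldl (fun t k => t + k) 0) = (m : Int) * ((m : Int) - 1) := by
  induction m with
  | zero => simp [PySem.List.pyRange_one_eq_nil]
  | succ m ih =>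
    have : ((m : Int) + 1) = ((m + 1 : Nat) : Int) := by push_cast; ring
    rw [← this, PySem.List.pyRange_one_succ_right (by positivity), List.foldl_append]
    simp only [List.foldl_cons, List.foldl_nil]
    push_cast at ih
    ring_nf
    ring_nf at ih
    omega

theorem show_sequence_spec : Claim_equal_show_sequence := by
  intro n _
  unfold Spec_show_sequence show_sequence show_sequence_alt
  by_cases h0 : n = 0
  · simp [h0]
  · rw [if_neg h0, if_neg h0]
    by_cases hneg : n < 0
    · rw [if_pos hneg, if_pos hneg]
    · rw [if_neg hneg, if_neg hneg]
      dsimp only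
      have hn1 : 1 ≤ n := by omega
      have hres : (PySem.List.pyRange 0 (n + 1) 1).foldl
          (fun acc number => acc ++ [PySem.Int.toStr number]) []
          = (PySem.List.pyRange 0 (n + 1) 1).map PySem.Int.toStr := by
        rw [foldl_append_map]; simp
      rw [hres]
      have htot : (PySem.List.pyRange 0 (PySem.List.len ((PySem.List.pyRange 0 (n + 1) 1).map PySem.Int.toStr)) 1).foldl
          (fun t i => t + (PySem.Int.ofStr? (PySem.List.pyGetD ((PySem.List.pyRange 0 (n + 1) 1).map PySem.Int.toStr) i "")).getD 0) 0
          = PySem.Int.floordiv (n * (n + 1)) 2 := by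
        rw [PySem.List.foldl_pyRange_zero_pyGetD ((PySem.List.pyRange 0 (n + 1) 1).map PySem.Int.toStr) ""
          (fun t s => t + (PySem.Int.ofStr? s).getD 0) 0]
        rw [List.foldl_map]
        rw [PySem.List.foldl_congr_mem (PySem.List.pyRange 0 (n + 1) 1)
          (fun t k => t + (PySem.Int.ofStr? (PySem.Int.toStr k)).getD 0) (fun t k => t + k) 0
          (fun acc x hx => by
            show acc + (PySem.Int.ofStr? (PySem.Int.toStr x)).getD 0 = acc + x
            rw [roundtrip x (PySem.List.mem_pyRange_one.mp hx).1]
            rfl)]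
        have hcast : ((n + 1).toNat : Int) = n + 1 := by omega
        have hsum := sum_pyRange (n + 1).toNat
        rw [hcast] at hsum
        have hsum2 : 2 * ((PySem.List.pyRange 0 (n + 1) 1).foldl (fun t k => t + k) 0) = n * (n + 1) := by
          linear_combination hsum
        have hgoal : PySem.Int.floordiv (n * (n + 1)) 2
            = (PySem.List.pyRange 0 (n + 1) 1).foldl (fun t k => t + k) 0 := by
          rw [PySem.Int.floordiv_eq_iff_of_pos (by omega : (0:Int) < 2)]
          constructor <;> linarith
        exact hgoal.symm
      rw [htot]
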